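-- pv_equiv track=rewrite | github.com/gallippimeli/analisis-sentimientos | FeelingsAnalysis.py | filterRowsByColumn
-- ===== SOURCE A (Python) =====
-- def filterRowsByColumn(rows, columnsDictionary, columns):
--   indexes = ([ columnsDictionary[column] for column in columns ]);
--   for column in columns:
--     newRows = [];
--     for row in rows:
--       if (row[columnsDictionary[column]]):
--         newRows.append(row);
--     rows = newRows;
--   filteredRows = [];
--   for row in rows:
--     filteredRow = [ row[index] for index in indexes ];
--     filteredRows.append(filteredRow);
--   return filteredRows;
-- ===== SOURCE B (Python) =====
-- def filterRowsByColumn(rows, columnsDictionary, columns):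
--   indexes = [columnsDictionary[column] for column in columns]
--   def project(row):
--     projected = []
--     for i in indexes:
--       cell = row[i]
--       if not cell:
--         return None
--       projected.append(cell)
--     return projected
--   result = []
--   for row in rows:
--     p = project(row)
--     if p is not None:
--       result.append(p)
--   return result
-- ===== Notes on version B (the rewrite author's own statement) =====
-- stated objective: faster
-- what changed: B computes the column indexes once, then makes a single pass over rows using an early-exit helper that projects a row cell by cell and aborts at the first falsy cell, instead of A's one full rescan of the shrinking row list per column (with a dict lookup per (column,row)) followed by a separate projection pass.
import Mathlib
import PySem

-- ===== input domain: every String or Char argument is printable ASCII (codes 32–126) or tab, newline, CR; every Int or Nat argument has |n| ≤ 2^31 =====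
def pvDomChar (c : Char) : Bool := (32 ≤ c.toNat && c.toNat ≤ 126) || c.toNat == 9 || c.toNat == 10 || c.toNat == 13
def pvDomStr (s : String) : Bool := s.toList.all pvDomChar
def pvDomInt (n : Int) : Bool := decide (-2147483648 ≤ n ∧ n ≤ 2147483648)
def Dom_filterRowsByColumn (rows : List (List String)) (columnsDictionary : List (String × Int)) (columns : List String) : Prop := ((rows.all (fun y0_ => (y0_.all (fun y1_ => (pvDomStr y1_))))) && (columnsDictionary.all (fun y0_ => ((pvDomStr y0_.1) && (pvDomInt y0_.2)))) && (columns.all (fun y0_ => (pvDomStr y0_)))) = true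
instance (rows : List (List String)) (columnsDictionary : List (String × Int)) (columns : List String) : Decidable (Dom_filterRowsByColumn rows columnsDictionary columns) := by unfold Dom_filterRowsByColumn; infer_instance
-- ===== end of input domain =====

-- B replaces A's per-column rescans of the shrinking row list by a single pass over rows with an
-- early-exit per-row projection helper (faster by a constant factor).

-- dict lookup on the association list: first match ('columnsDictionary[column]'; none = KeyError)
def pvLookup? (d : List (String × Int)) (k : String) : Option Int :=
  (d.find? (fun p => p.1 == k)).map (·.2)
-- total form used by the ports; Pre_ guarantees the key is present
def pvLookupD (d : List (String × Int)) (k : String) : Int :=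
  (pvLookup? d k).getD 0

-- ===== PORT A =====
def filterRowsByColumn (rows : List (List String)) (columnsDictionary : List (String × Int)) (columns : List String) : List (List String) :=
  let indexes := columns.map (fun column => pvLookupD columnsDictionary column)
  let rows := columns.foldl (fun rows column =>
    rows.foldl (fun newRows row =>
      if PySem.List.pyGetD row (pvLookupD columnsDictionary column) "" ≠ "" then newRows ++ [row]
      else newRows) []) rows
  rows.foldl (fun filteredRows row =>
    filteredRows ++ [indexes.map (fun index => PySem.List.pyGetD row index "")]) []

-- ===== PORT B =====
-- Source B's 'project': walk the index list keeping an accumulator; abort with none at the first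
-- falsy cell, otherwise return the projected row.
def pvProject? (row : List String) (projected : List String) : List Int → Option (List String)
  | [] => some projected
  | i :: is =>
    let cell := PySem.List.pyGetD row i ""
    if cell = "" then none
    else pvProject? row (projected ++ [cell]) is

def filterRowsByColumn_alt (rows : List (List String)) (columnsDictionary : List (String × Int)) (columns : List String) : List (List String) :=
  let indexes := columns.map (fun column => pvLookupD columnsDictionary column)
  rows.foldl (fun result row =>
    match pvProject? row [] indexes with
    | some p => result ++ [p]
    | none => result) []

-- ===== PRECONDITION & SPEC =====
-- Pre_ = exactly the inputs where Python A returns: every requested column is a key of the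
-- dictionary (else KeyError), and no row has an out-of-range column index that A's filters
-- actually reach, i.e. one whose preceding requested cells are all in range and truthy
-- (else IndexError).
def Pre_filterRowsByColumn (rows : List (List String)) (columnsDictionary : List (String × Int)) (columns : List String) : Prop :=
  (∀ c ∈ columns, (pvLookup? columnsDictionary c).isSome) ∧
  (∀ row ∈ rows, ∀ j < columns.length,
    (∀ i < j, ((PySem.List.pyGet? row (pvLookupD columnsDictionary (columns.getD i ""))).getD "") ≠ "") →
    (PySem.List.pyGet? row (pvLookupD columnsDictionary (columns.getD j ""))).isSome)
instance (rows : List (List String)) (columnsDictionary : List (String × Int)) (columns : List String) : Decidable (Pre_filterRowsByColumn rows columnsDictionary columns) := by unfold Pre_filterRowsByColumn; infer_instance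

def pvWitness_filterRowsByColumn : List (List String) × (List (String × Int)) × List String :=
  ([["a", "b"], ["", "c"]], [("x", 0), ("y", 1)], ["x", "y"])

def Spec_filterRowsByColumn (rows : List (List String)) (columnsDictionary : List (String × Int)) (columns : List String) (out : List (List String)) : Prop := out = filterRowsByColumn_alt rows columnsDictionary columns
instance (rows : List (List String)) (columnsDictionary : List (String × Int)) (columns : List String) (out : List (List String)) : Decidable (Spec_filterRowsByColumn rows columnsDictionary columns out) := by unfold Spec_filterRowsByColumn; infer_instance

-- ===== CLAIM (what is proved, stated in full; the proofs are below) =====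
def Claim_equal_filterRowsByColumn : Prop := ∀ (rows : List (List String)) (columnsDictionary : List (String × Int)) (columns : List String), Dom_filterRowsByColumn rows columnsDictionary columns → Pre_filterRowsByColumn rows columnsDictionary columns → Spec_filterRowsByColumn rows columnsDictionary columns (filterRowsByColumn rows columnsDictionary columns)

-- ===== LEMMAS AND PROOFS =====

-- Sequentially filtering by each column equals one filter by the conjunction of the tests.
theorem foldl_filter_eq_filter_all {α β : Type} (p : β → α → Bool) :
    ∀ (cols : List β) (rows : List α),
      cols.foldl (fun rs c => rs.filter (p c)) rows
      = rows.filter (fun row => cols.all (fun c => p c row)) := by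
  intro cols
  induction cols with
  | nil => intro rows; simp
  | cons c cs ih =>
    intro rows
    simp only [List.foldl_cons, ih, List.filter_filter, List.all_cons]
    exact List.filter_congr (fun row _ => by cases p c row <;> simp)

-- the early-exit projection characterised: succeeds iff every selected cell is truthy,
-- and then yields the straight projection
theorem pvProject?_spec (row : List String) :
    ∀ (idxs : List Int) (acc : List String),
      pvProject? row acc idxs
      = if idxs.all (fun i => PySem.List.pyGetD row i "" ≠ "") then
          some (acc ++ idxs.map (fun i => PySem.List.pyGetD row i ""))
        else none := by
  intro idxs
  induction idxs with
  | nil => intro acc; simp [pvProject?]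
  | cons i is ih =>
    intro acc
    simp only [pvProject?, List.all_cons, List.map_cons]
    by_cases h : PySem.List.pyGetD row i "" = "" <;>
      simp [h, ih]

-- B's single pass equals filter-then-map
theorem alt_foldl_eq (indexes : List Int) :
    ∀ (rows : List (List String)) (acc : List (List String)),
      rows.foldl (fun result row =>
        match pvProject? row [] indexes with
        | some p => result ++ [p]
        | none => result) acc
      = acc ++ (rows.filter (fun row => indexes.all (fun i => PySem.List.pyGetD row i "" ≠ ""))).map
          (fun row => indexes.map (fun i => PySem.List.pyGetD row i "")) := by
  intro rows
  induction rows with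
  | nil => intro acc; simp
  | cons r rs ih =>
    intro acc
    rw [List.foldl_cons, pvProject?_spec]
    by_cases hr : ∀ x ∈ indexes, ¬PySem.List.pyGetD r x "" = ""
    · have hb : (indexes.all fun i => !decide (PySem.List.pyGetD r i "" = "")) = true := by
        simpa using hr
      simp [hb, ih]
    · have hb : (indexes.all fun i => !decide (PySem.List.pyGetD r i "" = "")) = false := by
        simpa using hr
      simp [hb, ih]

theorem filterRowsByColumn_eq_alt (rows : List (List String))
    (columnsDictionary : List (String × Int)) (columns : List String) :
    filterRowsByColumn rows columnsDictionary columns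
      = filterRowsByColumn_alt rows columnsDictionary columns := by
  unfold filterRowsByColumn filterRowsByColumn_alt
  simp only [PySem.List.foldl_append_ite_eq_filter, List.nil_append,
    foldl_filter_eq_filter_all
      (fun c row => decide (PySem.List.pyGetD row (pvLookupD columnsDictionary c) "" ≠ "")),
    PySem.List.foldl_append_singleton_eq_map, alt_foldl_eq, List.nil_append, List.all_map]
  rfl

-- ===== VERDICT (by name: the statement is the Claim_ definition above) =====
theorem filterRowsByColumn_spec : Claim_equal_filterRowsByColumn := by
  intro rows columnsDictionary columns _ _
  exact filterRowsByColumn_eq_alt rows columnsDictionary columns
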